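-- pv_equiv track=rewrite | github.com/asmwasim/db-vault | src/db_vault/engines/mysql.py | _filter_tables
-- ===== SOURCE A (Python) =====
-- def _filter_tables(sql: str, tables: list[str]) -> str:
--     """Very basic filter to extract table-specific statements from a mysqldump.
--
--     This is a best-effort approach — for reliable selective restore,
--     dump individual tables during backup.
--     """
--     lines = sql.split("\n")
--     result_lines: list[str] = []
--     in_target_table = False
--     table_set = set(tables)
--
--     for line in lines:
--         # Detect table definition blocks
--         if line.startswith("-- Table structure for table") or line.startswith(
--                 "-- Dumping data for table"
--         ):
--             table_name = line.split("`")[1] if "`" in line else ""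
--             in_target_table = table_name in table_set
--
--         if in_target_table or line.startswith("--") or not line.strip():
--             result_lines.append(line)
--
--     return "\n".join(result_lines)
-- ===== SOURCE B (Python) =====
-- HEADERS = ("-- Table structure for table", "-- Dumping data for table")
--
--
-- def _is_header(line):
--     return line.startswith(HEADERS[0]) or line.startswith(HEADERS[1])
--
--
-- def _table_name(line):
--     return line.split("`")[1] if "`" in line else ""
--
--
-- def _emit(block, target):
--     # a target block is kept whole; otherwise only comment/blank lines survive
--     if target:
--         return list(block)
--     return [l for l in block if l.startswith("--") or not l.strip()]
--
--
-- def _filter_tables(sql: str, tables: list[str]) -> str: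
--     """Block-based rewrite: partition the dump into header-delimited blocks,
--     keep target blocks whole, keep only comments/blanks elsewhere."""
--     table_set = set(tables)
--     out: list[str] = []
--     block: list[str] = []
--     target = False
--     for line in sql.split("\n"):
--         if _is_header(line):
--             out.extend(_emit(block, target))
--             block = [line]
--             target = _table_name(line) in table_set
--         else:
--             block.append(line)
--     out.extend(_emit(block, target))
--     return "\n".join(out)
-- ===== Notes on version B (the rewrite author's own statement) =====
-- stated objective: alternative
-- what changed: Replaces A's single pass with a running in_target_table flag by partitioning the dump into header-delimited blocks and emitting each block wholesale (target) or filtered to comments/blanks (non-target/preamble).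
import Mathlib
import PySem

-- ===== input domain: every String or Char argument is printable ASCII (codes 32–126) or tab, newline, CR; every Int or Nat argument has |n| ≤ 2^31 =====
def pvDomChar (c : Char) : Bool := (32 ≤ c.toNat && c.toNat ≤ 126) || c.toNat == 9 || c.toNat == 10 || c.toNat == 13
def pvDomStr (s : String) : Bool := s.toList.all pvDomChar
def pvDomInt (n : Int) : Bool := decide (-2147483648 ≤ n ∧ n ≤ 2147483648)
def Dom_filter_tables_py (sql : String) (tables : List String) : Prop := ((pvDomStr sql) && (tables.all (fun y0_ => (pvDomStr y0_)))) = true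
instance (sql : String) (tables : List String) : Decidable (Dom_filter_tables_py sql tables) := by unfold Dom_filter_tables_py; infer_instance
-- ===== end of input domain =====

-- B replaces A's running in-target flag with a partition of the dump into
-- header-delimited blocks, emitting each block wholesale or filtered (objective: alternative decomposition).

-- ===== PORT A =====
-- literal transliteration of A's single loop with the in_target_table flag
-- (line.split("`")[1] is guarded by "`" in line, so index 1 exists; .getD "" only totalizes)
def filter_tables_py (sql : String) (tables : List String) : String :=
  let lines := (PySem.Str.split? sql "\n").getD []
  let tableSet := PySem.Set.ofList tables
  let st := lines.foldl (fun (st : List String × Bool) line =>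
    let inT :=
      if PySem.Str.startswith line "-- Table structure for table" ||
         PySem.Str.startswith line "-- Dumping data for table" then
        let tableName :=
          if PySem.Str.isIn "`" line then
            (PySem.List.pyGet? ((PySem.Str.split? line "`").getD []) 1).getD ""
          else ""
        PySem.Set.contains tableSet tableName
      else st.2
    if inT || PySem.Str.startswith line "--" || PySem.Str.strip line == "" then
      (st.1 ++ [line], inT)
    else (st.1, inT)) ([], false)
  PySem.Str.join "\n" st.1

-- ===== PORT B =====
def pvIsHeader (line : String) : Bool :=
  PySem.Str.startswith line "-- Table structure for table" ||
  PySem.Str.startswith line "-- Dumping data for table"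

def pvTableName (line : String) : String :=
  if PySem.Str.isIn "`" line then
    (PySem.List.pyGet? ((PySem.Str.split? line "`").getD []) 1).getD ""
  else ""

def pvEmit (block : List String) (target : Bool) : List String :=
  if target then block
  else block.filter (fun l => PySem.Str.startswith l "--" || PySem.Str.strip l == "")

def filter_tables_py_alt (sql : String) (tables : List String) : String :=
  let tableSet := PySem.Set.ofList tables
  let st := ((PySem.Str.split? sql "\n").getD []).foldl
    (fun (st : List String × List String × Bool) line =>
      if pvIsHeader line then
        (st.1 ++ pvEmit st.2.1 st.2.2, [line], PySem.Set.contains tableSet (pvTableName line))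
      else
        (st.1, st.2.1 ++ [line], st.2.2)) ([], [], false)
  PySem.Str.join "\n" (st.1 ++ pvEmit st.2.1 st.2.2)

-- ===== PRECONDITION & SPEC =====
def Spec_filter_tables_py (sql : String) (tables : List String) (out : String) : Prop := out = filter_tables_py_alt sql tables
instance (sql : String) (tables : List String) (out : String) : Decidable (Spec_filter_tables_py sql tables out) := by unfold Spec_filter_tables_py; infer_instance

-- ===== CLAIM (what is proved, stated in full; the proofs are below) =====
def Claim_equal_filter_tables_py : Prop := ∀ (sql : String) (tables : List String), Dom_filter_tables_py sql tables → Spec_filter_tables_py sql tables (filter_tables_py sql tables)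

-- ===== LEMMAS AND PROOFS =====

-- the common specification: the kept lines, threading the target flag
def pvKeep (s : List String) : List String → Bool → List String
  | [], _ => []
  | line :: rest, tgt =>
    if pvIsHeader line then
      line :: pvKeep s rest (PySem.Set.contains s (pvTableName line))
    else if tgt || PySem.Str.startswith line "--" || PySem.Str.strip line == "" then
      line :: pvKeep s rest tgt
    else
      pvKeep s rest tgt

lemma header_starts_dashdash {line : String} (h : pvIsHeader line = true) :
    PySem.Str.startswith line "--" = true := by
  unfold pvIsHeader at h
  rcases Bool.or_eq_true_iff.mp h with h | h <;>
  · rw [PySem.Str.startswith] at h ⊢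
    rw [PySem.Chars.startswith_iff] at h ⊢
    exact List.IsPrefix.trans (by decide) h

lemma foldA_eq_keep (s : List String) (lines : List String) :
    ∀ (res : List String) (b : Bool),
    (lines.foldl (fun (st : List String × Bool) line =>
      let inT :=
        if PySem.Str.startswith line "-- Table structure for table" ||
           PySem.Str.startswith line "-- Dumping data for table" then
          let tableName :=
            if PySem.Str.isIn "`" line then
              (PySem.List.pyGet? ((PySem.Str.split? line "`").getD []) 1).getD ""
            else ""
          PySem.Set.contains s tableName
        else st.2
      if inT || PySem.Str.startswith line "--" || PySem.Str.strip line == "" then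
        (st.1 ++ [line], inT)
      else (st.1, inT)) (res, b)).1 = res ++ pvKeep s lines b := by
  induction lines with
  | nil => intro res b; simp [pvKeep]
  | cons line rest ih =>
    intro res b
    by_cases hh : pvIsHeader line = true
    · have hd := header_starts_dashdash hh
      have hhb : (PySem.Str.startswith line "-- Table structure for table" ||
          PySem.Str.startswith line "-- Dumping data for table") = true := hh
      simp only [List.foldl_cons, hhb, hd, pvKeep, hh, Bool.true_or, Bool.or_true,
        ↓reduceIte, ih, pvTableName]
      simp
    · have hd : pvIsHeader line = false := by simpa using hh
      have hhb : (PySem.Str.startswith line "-- Table structure for table" ||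
          PySem.Str.startswith line "-- Dumping data for table") = false := hd
      simp only [List.foldl_cons, hhb, Bool.false_eq_true, ↓reduceIte, pvKeep, hd]
      by_cases hk : (b || PySem.Str.startswith line "--" || PySem.Str.strip line == "") = true
      · simp only [hk, ↓reduceIte, ih]
        simp
      · have hk' : (b || PySem.Str.startswith line "--" || PySem.Str.strip line == "") = false := by
          simpa using hk
        simp only [hk', Bool.false_eq_true, ↓reduceIte, ih]

lemma pvEmit_append (blk : List String) (line : String) (tgt : Bool) :
    pvEmit (blk ++ [line]) tgt =
      pvEmit blk tgt ++
        (if tgt || PySem.Str.startswith line "--" || PySem.Str.strip line == "" then [line] else []) := by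
  unfold pvEmit
  by_cases h : tgt = true
  · simp [h]
  · simp only [Bool.not_eq_true] at h
    subst h
    simp only [Bool.false_eq_true, if_false, List.filter_append, Bool.false_or, List.filter]
    split <;> simp_all

lemma foldB_eq_keep (s : List String) (lines : List String) :
    ∀ (out blk : List String) (tgt : Bool),
    (let st := lines.foldl
      (fun (st : List String × List String × Bool) line =>
        if pvIsHeader line then
          (st.1 ++ pvEmit st.2.1 st.2.2, [line], PySem.Set.contains s (pvTableName line))
        else
          (st.1, st.2.1 ++ [line], st.2.2)) (out, blk, tgt)
     st.1 ++ pvEmit st.2.1 st.2.2) = out ++ pvEmit blk tgt ++ pvKeep s lines tgt := by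
  induction lines with
  | nil => intro out blk tgt; simp [pvKeep]
  | cons line rest ih =>
    intro out blk tgt
    by_cases hh : pvIsHeader line = true
    · have hd := header_starts_dashdash hh
      simp only [List.foldl_cons, hh, ↓reduceIte, pvKeep, ih]
      have h1 : pvEmit [line] (PySem.Set.contains s (pvTableName line)) = [line] := by
        unfold pvEmit
        split
        · rfl
        · have hd' : PySem.Chars.startswith line.toList ['-', '-'] = true := by
            rw [PySem.Str.startswith] at hd; simpa using hd
          simp [List.filter, hd']
      rw [h1]
      simp
    · have hd : pvIsHeader line = false := by simpa using hh
      simp only [List.foldl_cons, hd, Bool.false_eq_true, ↓reduceIte, pvKeep, ih, pvEmit_append]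
      by_cases hk : (tgt || PySem.Str.startswith line "--" || PySem.Str.strip line == "") = true
      · rw [hk]
        simp
      · have hk' : (tgt || PySem.Str.startswith line "--" || PySem.Str.strip line == "") = false := by
          simpa using hk
        rw [hk']
        simp

-- ===== VERDICT (by name: the statement is the Claim_ definition above) =====
theorem filter_tables_py_spec : Claim_equal_filter_tables_py := by
  intro sql tables _
  unfold Spec_filter_tables_py filter_tables_py filter_tables_py_alt
  have hA := foldA_eq_keep (PySem.Set.ofList tables) ((PySem.Str.split? sql "\n").getD []) [] false
  have hB := foldB_eq_keep (PySem.Set.ofList tables) ((PySem.Str.split? sql "\n").getD []) [] [] false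
  simp only [] at hA hB ⊢
  rw [hA] at *
  rw [hB]
  simp [pvEmit]
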